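-- pv_equiv track=rewrite | github.com/vhiwase/AIFormMapper | app/utils/azure_document_ai.py | get_increasing_sequence
-- ===== SOURCE A (Python) =====
-- def get_increasing_sequence(lst):
--     count = 1
--     seq = []
--     prev_item = lst and lst[0]
--     for item in lst:
--         if prev_item != item:
--             count += 1
--         seq.append(count)
--         prev_item = item
--     return seq
-- ===== SOURCE B (Python) =====
-- def get_increasing_sequence(lst):
--     res = []
--     idx = 0
--     i = 0
--     n = len(lst)
--     while i < n:
--         j = i + 1
--         while j < n and lst[j] == lst[i]:
--             j += 1
--         idx += 1
--         res += [idx] * (j - i)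
--         i = j
--     return res
-- ===== Notes on version B (the rewrite author's own statement) =====
-- stated objective: alternative
-- what changed: B iterates over maximal runs of equal consecutive elements (two-index run scan, extending the output by a replicated run index) instead of A's elementwise pass with a prev_item comparison and running counter.
import Mathlib
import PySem

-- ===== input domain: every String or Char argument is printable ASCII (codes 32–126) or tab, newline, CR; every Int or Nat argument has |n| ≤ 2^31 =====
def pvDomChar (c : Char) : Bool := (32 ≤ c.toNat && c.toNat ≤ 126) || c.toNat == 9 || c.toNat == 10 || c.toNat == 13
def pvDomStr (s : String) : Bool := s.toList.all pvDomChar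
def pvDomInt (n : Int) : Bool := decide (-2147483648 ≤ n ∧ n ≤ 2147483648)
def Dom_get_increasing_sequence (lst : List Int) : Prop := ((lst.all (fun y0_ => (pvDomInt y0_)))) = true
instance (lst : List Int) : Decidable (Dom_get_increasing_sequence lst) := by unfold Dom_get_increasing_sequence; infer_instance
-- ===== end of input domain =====

-- B rewrites A's elementwise prev-item pass as a scan over maximal runs of equal
-- consecutive elements, appending each run's 1-based index replicated over the run
-- (objective: alternative decomposition, same cost).

-- ===== PORT A =====
-- A: count = 1; seq = []; prev_item = lst and lst[0]; for item in lst: …; return seq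
-- (for empty lst the loop body never runs, so only the nonempty initial prev_item matters)
def get_increasing_sequence (lst : List Int) : List Int :=
  match lst with
  | [] => []
  | x :: _ =>
    (lst.foldl (fun (s : Int × Int × List Int) item =>
      let count := if s.2.1 ≠ item then s.1 + 1 else s.1
      (count, item, s.2.2 ++ [count])) (1, x, [])).2.2

-- ===== PORT B =====
-- inner while loop of Source B: advancing j over the run is rendered structurally — splitRun
-- lst[i] (suffix after position i) returns (j - i, suffix from j): run length and remainder
def splitRun (x : Int) : List Int → (Nat × List Int)
  | [] => (1, [])
  | y :: ys =>
    if y = x then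
      let r := splitRun x ys
      (r.1 + 1, r.2)
    else (1, y :: ys)

theorem splitRun_length_le (x : Int) (xs : List Int) : (splitRun x xs).2.length ≤ xs.length := by
  induction xs with
  | nil => simp [splitRun]
  | cons y ys ih =>
    simp only [splitRun]
    split
    · exact le_trans ih (Nat.le_succ _)
    · simp

-- outer while loop of Source B: i walks run by run; the suffix from i is the recursion argument,
-- idx is carried, res is built by append
def altGo (idx : Int) : List Int → List Int
  | [] => []
  | x :: xs =>
    let r := splitRun x xs
    List.replicate r.1 (idx + 1) ++ altGo (idx + 1) r.2
termination_by xs => xs.length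
decreasing_by
  exact Nat.lt_succ_of_le (splitRun_length_le x xs)

def get_increasing_sequence_alt (lst : List Int) : List Int := altGo 0 lst

-- ===== PRECONDITION & SPEC =====
def Spec_get_increasing_sequence (lst : List Int) (out : List Int) : Prop := out = get_increasing_sequence_alt lst
instance (lst : List Int) (out : List Int) : Decidable (Spec_get_increasing_sequence lst out) := by unfold Spec_get_increasing_sequence; infer_instance

-- ===== CLAIM (what is proved, stated in full; the proofs are below) =====
def Claim_equal_get_increasing_sequence : Prop := ∀ (lst : List Int), Dom_get_increasing_sequence lst → Spec_get_increasing_sequence lst (get_increasing_sequence lst)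

-- ===== LEMMAS AND PROOFS =====

-- A's loop, abstracted: emit the count for each item, given the running count c and previous item p
def aGo (c p : Int) : List Int → List Int
  | [] => []
  | x :: xs =>
    let c' := if p ≠ x then c + 1 else c
    c' :: aGo c' x xs

theorem foldl_eq_aGo (xs : List Int) : ∀ (c p : Int) (seq : List Int),
    (xs.foldl (fun (s : Int × Int × List Int) item =>
      let count := if s.2.1 ≠ item then s.1 + 1 else s.1
      (count, item, s.2.2 ++ [count])) (c, p, seq)).2.2 = seq ++ aGo c p xs := by
  induction xs with
  | nil => simp [aGo]
  | cons x xs ih =>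
    intro c p seq
    simp only [List.foldl, aGo, ih]
    split <;> simp

theorem aGo_splitRun (xs : List Int) : ∀ (c x : Int),
    c :: aGo c x xs = List.replicate (splitRun x xs).1 c ++ aGo c x (splitRun x xs).2 := by
  induction xs with
  | nil => simp [aGo, splitRun]
  | cons y ys ih =>
    intro c x
    by_cases h : y = x
    · subst h
      have h1 : aGo c y (y :: ys) = c :: aGo c y ys := by simp [aGo]
      simp only [splitRun, h1, ih c y]
      simp [List.replicate_succ]
    · simp [splitRun, h, aGo]

theorem splitRun_rest_ne (x : Int) (xs : List Int) :
    ∀ y ys, (splitRun x xs).2 = y :: ys → y ≠ x := by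
  induction xs with
  | nil => simp [splitRun]
  | cons z zs ih =>
    intro y ys h
    by_cases hz : z = x
    · simp only [splitRun, if_pos hz] at h
      exact ih y ys h
    · simp only [splitRun, if_neg hz] at h
      injection h with h1 _
      exact h1 ▸ hz

theorem altGo_eq_aGo (n : Nat) : ∀ (xs : List Int), xs.length ≤ n → ∀ (idx x : Int),
    altGo idx (x :: xs) = (idx + 1) :: aGo (idx + 1) x xs := by
  induction n with
  | zero =>
    intro xs h idx x
    have : xs = [] := List.eq_nil_of_length_eq_zero (Nat.le_zero.mp h)
    subst this
    simp [altGo, splitRun, aGo]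
  | succ n ih =>
    intro xs h idx x
    rw [altGo, aGo_splitRun xs (idx + 1) x]
    congr 1
    rcases hr : (splitRun x xs).2 with _ | ⟨y, ys⟩
    · simp [aGo, altGo]
    · have hy : y ≠ x := splitRun_rest_ne x xs y ys hr
      have hlen : ys.length ≤ n := by
        have := splitRun_length_le x xs
        rw [hr] at this
        simp only [List.length_cons] at this
        omega
      rw [ih ys hlen (idx + 1) y]
      have hxy : ¬ x = y := fun he => hy he.symm
      simp [aGo, hxy]

-- ===== VERDICT (by name: the statement is the Claim_ definition above) =====
theorem get_increasing_sequence_spec : Claim_equal_get_increasing_sequence := by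
  intro lst _
  unfold Spec_get_increasing_sequence
  cases lst with
  | nil => simp [get_increasing_sequence, get_increasing_sequence_alt, altGo]
  | cons x xs =>
    simp only [get_increasing_sequence, get_increasing_sequence_alt]
    rw [foldl_eq_aGo, altGo_eq_aGo xs.length xs le_rfl 0 x]
    simp [aGo]
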